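-- pv_equiv track=rewrite | github.com/AshGreyG/Answer-To-Algorithm-Problems | luogu/P1007-single-plank-birdge.py | max_time
-- ===== SOURCE A (Python) =====
-- from typing import List
--
-- def max_time(bridge : int, pos : List[int]) -> int :
--     """
--     Question says that if two soldiers encounter each other, they will turn back
--     and this process doesn't consume any time ! So it's equal to they actually
--     go through each other.
--     """
--
--     max = 0
--     for p in pos :
--         if p >= bridge - p + 1 and p >= max :
--             max = p
--         elif p < bridge - p + 1 and bridge - p + 1 >= max :
--             max = bridge - p + 1
--     return max
-- ===== SOURCE B (Python) =====
-- def max_time(bridge, pos):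
--     if not pos:
--         return 0
--     return max(0, max(pos), bridge + 1 - min(pos))
-- ===== Notes on version B (the rewrite author's own statement) =====
-- stated objective: simpler
-- what changed: Replaces the per-element running-best loop with the closed form max(0, max(pos), bridge+1-min(pos)) over the two extreme positions, using that max over p of max(p, bridge-p+1) equals max(max(pos), bridge+1-min(pos)).
import Mathlib
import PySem

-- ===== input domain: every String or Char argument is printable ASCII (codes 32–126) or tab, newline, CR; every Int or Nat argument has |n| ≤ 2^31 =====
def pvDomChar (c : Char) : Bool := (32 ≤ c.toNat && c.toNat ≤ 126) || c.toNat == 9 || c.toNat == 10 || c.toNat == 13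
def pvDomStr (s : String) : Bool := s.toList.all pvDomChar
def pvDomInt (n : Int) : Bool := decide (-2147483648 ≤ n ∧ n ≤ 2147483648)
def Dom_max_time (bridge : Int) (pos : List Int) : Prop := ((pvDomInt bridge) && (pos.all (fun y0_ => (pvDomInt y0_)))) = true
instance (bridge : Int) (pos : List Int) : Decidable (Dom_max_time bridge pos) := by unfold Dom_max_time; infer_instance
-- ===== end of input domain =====

-- B computes max(0, max(pos), bridge+1-min(pos)) from the two extreme positions instead of A's
-- per-element running best; objective: simpler (same O(n) cost). Proven equal on all inputs.

-- ===== PORT A =====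
def max_time (bridge : Int) (pos : List Int) : Int :=
  pos.foldl (fun m p =>
    if p ≥ bridge - p + 1 ∧ p ≥ m then p
    else if p < bridge - p + 1 ∧ bridge - p + 1 ≥ m then bridge - p + 1
    else m) 0

-- ===== PORT B =====
def max_time_alt (bridge : Int) (pos : List Int) : Int :=
  match pos with
  | [] => 0
  | h :: t => max 0 (max (t.foldl max h) (bridge + 1 - t.foldl min h))

-- ===== PRECONDITION & SPEC =====
def Spec_max_time (bridge : Int) (pos : List Int) (out : Int) : Prop := out = max_time_alt bridge pos
instance (bridge : Int) (pos : List Int) (out : Int) : Decidable (Spec_max_time bridge pos out) := by unfold Spec_max_time; infer_instance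

-- ===== CLAIM (what is proved, stated in full; the proofs are below) =====
def Claim_equal_max_time : Prop := ∀ (bridge : Int) (pos : List Int), Dom_max_time bridge pos → Spec_max_time bridge pos (max_time bridge pos)

-- ===== LEMMAS AND PROOFS =====

theorem pv_step_eq (b m p : Int) :
    (if p ≥ b - p + 1 ∧ p ≥ m then p
     else if p < b - p + 1 ∧ b - p + 1 ≥ m then b - p + 1
     else m) = max m (max p (b + 1 - p)) := by
  split_ifs <;> omega

theorem pv_key (b : Int) : ∀ (t : List Int) (c y z : Int),
    t.foldl (fun m p =>
      if p ≥ b - p + 1 ∧ p ≥ m then p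
      else if p < b - p + 1 ∧ b - p + 1 ≥ m then b - p + 1
      else m) (max c (max y (b + 1 - z)))
      = max c (max (t.foldl max y) (b + 1 - t.foldl min z)) := by
  intro t
  induction t with
  | nil => intro c y z; simp [List.foldl]
  | cons p t ih =>
      intro c y z
      simp only [List.foldl]
      rw [pv_step_eq]
      have h : max (max c (max y (b + 1 - z))) (max p (b + 1 - p))
             = max c (max (max y p) (b + 1 - min z p)) := by omega
      rw [h, ih]

-- ===== VERDICT (by name: the statement is the Claim_ definition above) =====
theorem max_time_spec : Claim_equal_max_time := by
  intro b pos _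
  unfold Spec_max_time max_time max_time_alt
  cases pos with
  | nil => simp [List.foldl]
  | cons h t =>
      simp only [List.foldl]
      rw [pv_step_eq]
      calc List.foldl _ (max 0 (max h (b + 1 - h))) t
          = max 0 (max (t.foldl max h) (b + 1 - t.foldl min h)) := pv_key b t 0 h h
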